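-- pv_equiv track=rewrite | github.com/parkjiu0208/coding_study | Python/study/DAY12/day12_6.py | solution
-- ===== SOURCE A (Python) =====
-- def solution(arr):
--     answer = []
--     for i in range(len(arr)):
--         if arr[i]==2:
--             answer=(arr[i:])
--             break
--     if answer == []:
--         return [-1]
--     else:
--         while answer[-1]!=2:
--             answer.pop()
--         return answer
-- ===== SOURCE B (Python) =====
-- def solution(arr):
--     try:
--         first = arr.index(2)
--     except ValueError:
--         return [-1]
--     last = len(arr) - 1 - arr[::-1].index(2)
--     return arr[first:last + 1]
-- ===== Notes on version B (the rewrite author's own statement) =====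
-- stated objective: simpler
-- what changed: B locates the first and last occurrences of 2 by index lookups and returns a single slice arr[first:last+1], replacing A's break-out for loop plus destructive pop-until-2 while loop.
import Mathlib
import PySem

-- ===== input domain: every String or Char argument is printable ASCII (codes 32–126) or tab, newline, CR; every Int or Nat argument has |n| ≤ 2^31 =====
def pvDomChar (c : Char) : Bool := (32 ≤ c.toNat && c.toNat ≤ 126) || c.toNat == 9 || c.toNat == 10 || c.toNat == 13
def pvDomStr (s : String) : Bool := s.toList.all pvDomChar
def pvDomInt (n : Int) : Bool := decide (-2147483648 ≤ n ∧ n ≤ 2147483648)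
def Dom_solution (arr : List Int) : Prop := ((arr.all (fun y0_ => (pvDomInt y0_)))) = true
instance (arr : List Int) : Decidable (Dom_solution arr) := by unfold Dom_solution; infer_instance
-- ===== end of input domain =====

-- B replaces A's break-out for loop and destructive pop-until-2 while loop by two index
-- lookups and a single slice (simpler; return value only — A mutates its local copy, not arr).


-- ===== PORT A =====
-- the for-loop with break: first i with arr[i] == 2 gives answer = arr[i:], else answer stays []
def aFor : List Int → List Int
  | [] => []
  | x :: xs => if x = 2 then x :: xs else aFor xs

-- the while loop: pop from the end while the last element is not 2
-- (Python raises on an empty list there; in A's use the list always starts with 2, so [] is unreachable)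
def popLoop : List Int → List Int
  | [] => []
  | x :: xs =>
      if (x :: xs).getLast (by simp) ≠ 2 then popLoop (x :: xs).dropLast else x :: xs
termination_by l => l.length
decreasing_by simp [List.length_dropLast]

def solution (arr : List Int) : List Int :=
  let answer := aFor arr
  if answer = [] then [-1] else popLoop answer

-- ===== PORT B =====
-- arr[::-1] is arr.reverse (PySem.List.slice?_none_none_neg_one)
def solution_alt (arr : List Int) : List Int :=
  match PySem.List.index? arr 2 with
  | none => [-1]
  | some first =>
      let last : Int := (arr.length : Int) - 1 - (((PySem.List.index? arr.reverse 2).getD 0 : Nat) : Int)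
      PySem.List.slice arr (some (first : Int)) (some (last + 1))

-- ===== PRECONDITION & SPEC =====
def Spec_solution (arr : List Int) (out : List Int) : Prop := out = solution_alt arr
instance (arr : List Int) (out : List Int) : Decidable (Spec_solution arr out) := by unfold Spec_solution; infer_instance

-- ===== CLAIM (what is proved, stated in full; the proofs are below) =====
def Claim_equal_solution : Prop := ∀ (arr : List Int), Dom_solution arr → Spec_solution arr (solution arr)

-- ===== LEMMAS AND PROOFS =====

theorem aFor_eq_nil_iff (l : List Int) : aFor l = [] ↔ 2 ∉ l := by
  induction l with
  | nil => simp [aFor]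
  | cons x xs ih =>
      by_cases hx : x = 2
      · subst hx; simp [aFor]
      · simp only [aFor, if_neg hx, ih, List.mem_cons, not_or]
        exact ⟨fun h => ⟨fun h2 => hx (Eq.symm h2), h⟩, And.right⟩

theorem aFor_append (pre suf : List Int) (hpre : 2 ∉ pre) :
    aFor (pre ++ 2 :: suf) = 2 :: suf := by
  induction pre with
  | nil => simp [aFor]
  | cons x xs ih =>
      simp only [List.mem_cons, not_or] at hpre
      have hx : ¬ x = 2 := fun h => hpre.1 (Eq.symm h)
      simp [aFor, hx, ih hpre.2]

theorem popLoop_eq_dropWhile_rev (l : List Int) (h2 : 2 ∈ l) :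
    popLoop l = (l.reverse.dropWhile (· ≠ 2)).reverse := by
  induction hn : l.length using Nat.strong_induction_on generalizing l with
  | _ n ih =>
      match l, h2 with
      | x :: xs, h2 =>
        have hne : x :: xs ≠ [] := by simp
        rw [popLoop]
        have hrev : (x :: xs).reverse = (x :: xs).getLast hne :: (x :: xs).dropLast.reverse := by
          conv_lhs => rw [← List.dropLast_append_getLast hne]
          simp
        by_cases hl : (x :: xs).getLast hne = 2
        · rw [if_neg (by simp [hl])]
          conv_rhs => rw [hrev]
          rw [List.dropWhile_cons_of_neg (by simp [hl]), ← hrev, List.reverse_reverse]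
        · rw [if_pos (by simp [hl])]
          have h2' : 2 ∈ (x :: xs).dropLast := by
            rcases (List.mem_append.mp (by rw [List.dropLast_append_getLast hne]; exact h2)) with h | h
            · exact h
            · simp at h; exact absurd h.symm hl
          have hlen : (x :: xs).dropLast.length < n := by
            subst hn; simp
          rw [ih _ hlen _ h2' rfl, hrev, List.dropWhile_cons_of_pos (by simp [hl])]

theorem dropWhile_of_index? (l : List Int) (k : Nat) (hk : PySem.List.index? l 2 = some k) :
    l.dropWhile (· ≠ 2) = l.drop k := by
  obtain ⟨pre, suf, hsplit, hlen, hnot⟩ := (PySem.List.index?_eq_some_iff l 2 k).mp hk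
  subst hsplit
  rw [List.dropWhile_append]
  have hall : ∀ x ∈ pre, ¬ x = 2 := fun x hx he => hnot (he ▸ hx)
  simp [← hlen]
  exact fun _ => hall

theorem solution_spec : Claim_equal_solution := by
  intro arr _
  unfold Spec_solution solution solution_alt
  cases hidx : PySem.List.index? arr 2 with
  | none =>
      have h2 : 2 ∉ arr := (PySem.List.index?_eq_none_iff arr 2).mp hidx
      simp [(aFor_eq_nil_iff arr).mpr h2]
  | some first =>
      obtain ⟨pre, suf, hsplit, hlen, hnot⟩ := (PySem.List.index?_eq_some_iff arr 2 first).mp hidx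
      subst hsplit
      have hafor : aFor (pre ++ 2 :: suf) = 2 :: suf := aFor_append pre suf hnot
      -- the last occurrence, read off the reversed list
      have hrevsplit : (pre ++ 2 :: suf).reverse = (2 :: suf).reverse ++ pre.reverse := by
        simp
      have hmem : (2 : Int) ∈ (2 :: suf).reverse := by simp
      obtain ⟨ridx, hridx⟩ : ∃ k, PySem.List.index? (2 :: suf).reverse 2 = some k := by
        cases hk : PySem.List.index? (2 :: suf).reverse 2 with
        | none => exact absurd ((PySem.List.index?_eq_none_iff _ _).mp hk) (by simp)
        | some k => exact ⟨k, rfl⟩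
      have hridx_arr : PySem.List.index? (pre ++ 2 :: suf).reverse 2 = some ridx := by
        rw [hrevsplit, PySem.List.index?_append_of_mem _ hmem, hridx]
      obtain ⟨hklt, -, -⟩ := PySem.List.getElem_of_index?_eq_some hridx
      have hklt' : ridx ≤ suf.length := by simpa using Nat.lt_succ_iff.mp (by simpa using hklt)
      have hpop : popLoop (2 :: suf) =
          ((2 :: suf).reverse.drop ridx).reverse := by
        rw [popLoop_eq_dropWhile_rev _ (by simp), dropWhile_of_index? _ _ hridx]
      have hdroprev : ((2 :: suf).reverse.drop ridx).reverse
          = (2 :: suf).take (suf.length + 1 - ridx) := by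
        rw [List.reverse_drop]
        simp
      -- the slice bound (arr.length : Int) - 1 - ridx + 1 as a natural number
      have hlenarr : (pre ++ 2 :: suf).length = pre.length + suf.length + 1 := by
        simp; omega
      have hbound : ((pre ++ 2 :: suf).length : Int) - 1 - (ridx : Int) + 1
          = (((pre ++ 2 :: suf).length - ridx : Nat) : Int) := by
        rw [hlenarr]; push_cast; omega
      rw [hridx_arr]
      simp only [Option.getD_some, hafor, hbound]
      rw [if_neg (by simp), PySem.List.slice_natCast, ← hlen, List.drop_left]
      rw [hpop, hdroprev, hlenarr]
      congr 1
      omega
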